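-- pv_equiv track=rewrite | github.com/pypi-data/pypi-mirror-114 | packages/vdr/vdr-2.0.4.tar.gz/vdr-2.0.4/vdr/sentences.py | PBP
-- ===== SOURCE A (Python) =====
-- def checksum(sentence):
--     checksum = 0
--     for el in sentence[1:]:
--         checksum ^= ord(el)
--     return "*" + str(format(checksum, 'x'))
--
-- def PBP(id, capacity, level, quantity):
--     """Power Bank Parameters"""
--     fields = (
--         ("Power bank ID", id),
--         ("Power bank capacity", capacity),
--         ("Power bank level", level),
--         ("Power bank quantity", quantity)
--     )
--
--     sentence = "$PFPBP,"
--     for i in fields: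
--         sentence += str(i[1]) + ","
--
--     return sentence + checksum(sentence) + "\t\n"
-- ===== SOURCE B (Python) =====
-- def _sx(s):
--     v = 0
--     for ch in s:
--         v ^= ord(ch)
--     return v
--
-- def PBP(id, capacity, level, quantity):
--     """Power Bank Parameters.
--
--     The checksum is computed algebraically instead of scanning the finished
--     sentence: the fixed prefix "PFPBP," contributes the precomputed constant
--     120, and the four field-terminating commas appear an even number of times
--     so their XOR contributions cancel and are skipped entirely; only the
--     decimal texts of the four fields are XOR-folded.  The sentence body is
--     assembled with a join instead of incremental concatenation."""
--     strs = [str(f) for f in (id, capacity, level, quantity)]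
--     cs = 120  # XOR of ord(c) for c in "PFPBP,"; the 4 commas cancel pairwise
--     for s in strs:
--         cs ^= _sx(s)
--     return "$PFPBP," + ",".join(strs) + ",*" + format(cs, "x") + "\t\n"
-- ===== Notes on version B (the rewrite author's own statement) =====
-- stated objective: alternative
-- what changed: B never scans the sentence for the checksum: it uses the algebraic identity that XOR of the fixed prefix 'PFPBP,' is the constant 120 and that the four commas' contributions cancel pairwise, folding only the fields' decimal texts, and it assembles the body with a join instead of incremental concatenation.
import Mathlib
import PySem

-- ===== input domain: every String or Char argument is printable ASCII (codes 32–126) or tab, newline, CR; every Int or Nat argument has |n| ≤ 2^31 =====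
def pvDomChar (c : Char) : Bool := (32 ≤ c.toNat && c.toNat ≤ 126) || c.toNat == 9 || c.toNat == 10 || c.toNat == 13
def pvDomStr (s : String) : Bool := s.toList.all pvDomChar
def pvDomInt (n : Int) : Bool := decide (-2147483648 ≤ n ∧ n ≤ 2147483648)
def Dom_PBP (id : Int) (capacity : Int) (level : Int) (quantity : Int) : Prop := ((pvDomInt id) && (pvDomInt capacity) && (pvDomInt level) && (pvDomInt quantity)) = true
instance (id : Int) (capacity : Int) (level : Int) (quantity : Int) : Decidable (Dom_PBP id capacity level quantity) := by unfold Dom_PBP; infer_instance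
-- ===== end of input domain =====

-- ===== PORT A =====
-- B replaces A's checksum rescan of the built sentence by an algebraic computation
-- (prefix constant 120, the four commas cancel pairwise) and builds the body with a join.
-- format(n,'x'): lowercase hex of a nonnegative int, no padding (exact for n ≥ 0, which holds here)
def pvHexDigit (n : Nat) : Char := if n < 10 then Char.ofNat (48 + n) else Char.ofNat (87 + n)

def pvHexAux (n : Nat) (acc : List Char) : List Char :=
  if n = 0 then acc else pvHexAux (n / 16) (pvHexDigit (n % 16) :: acc)

def pvHex (n : Nat) : String :=
  if n = 0 then "0" else String.ofList (pvHexAux n [])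

-- checksum(sentence): sentence[1:] is exactly drop 1 (sentence nonempty at the call site)
def pvChecksumA (sentence : String) : String :=
  let cs := (sentence.toList.drop 1).foldl (fun a c => a ^^^ c.toNat) 0
  "*" ++ pvHex cs

def PBP (id : Int) (capacity : Int) (level : Int) (quantity : Int) : String :=
  let fields : List (String × Int) :=
    [("Power bank ID", id), ("Power bank capacity", capacity),
     ("Power bank level", level), ("Power bank quantity", quantity)]
  let sentence := fields.foldl (fun s i => s ++ PySem.Int.toStr i.2 ++ ",") "$PFPBP,"
  sentence ++ pvChecksumA sentence ++ "\t\n"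

-- ===== PORT B =====
-- _sx(s): XOR of the character codes of s
def pvSx (s : String) : Nat := s.toList.foldl (fun a c => a ^^^ c.toNat) 0

def PBP_alt (id : Int) (capacity : Int) (level : Int) (quantity : Int) : String :=
  let strs : List String :=
    [id, capacity, level, quantity].map (fun f => PySem.Int.toStr f)
  -- cs starts at 120 = XOR of ord(c) for c in "PFPBP,"; the 4 commas cancel pairwise
  let cs := strs.foldl (fun a s => a ^^^ pvSx s) 120
  "$PFPBP," ++ String.join (strs.intersperse ",") ++ ",*" ++ pvHex cs ++ "\t\n"

-- ===== PRECONDITION & SPEC =====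
def Spec_PBP (id : Int) (capacity : Int) (level : Int) (quantity : Int) (out : String) : Prop := out = PBP_alt id capacity level quantity
instance (id : Int) (capacity : Int) (level : Int) (quantity : Int) (out : String) : Decidable (Spec_PBP id capacity level quantity out) := by unfold Spec_PBP; infer_instance

-- ===== CLAIM (what is proved, stated in full; the proofs are below) =====
def Claim_equal_PBP : Prop := ∀ (id : Int) (capacity : Int) (level : Int) (quantity : Int), Dom_PBP id capacity level quantity → Spec_PBP id capacity level quantity (PBP id capacity level quantity)

-- ===== LEMMAS AND PROOFS =====
-- XOR of the codes of a character list (the atom the checksum algebra is about)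
def pvSxL (l : List Char) : Nat := l.foldl (fun a c => a ^^^ c.toNat) 0

theorem pv_foldl_xor_shift (l : List Char) (a : Nat) :
    l.foldl (fun a c => a ^^^ c.toNat) a = a ^^^ pvSxL l := by
  induction l generalizing a with
  | nil => simp [pvSxL]
  | cons c t ih =>
    simp only [List.foldl_cons, pvSxL] at *
    rw [ih (a ^^^ c.toNat), ih (0 ^^^ c.toNat), Nat.zero_xor, Nat.xor_assoc]

-- A's checksum of the full sentence equals B's algebraic form: the prefix
-- contributes the constant 120 and the four commas (code 44) cancel pairwise.
theorem pv_cs_eq (s1 s2 s3 s4 : String) :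
    (("$PFPBP," ++ s1 ++ "," ++ s2 ++ "," ++ s3 ++ "," ++ s4 ++ ",").toList.drop 1).foldl
        (fun a c => a ^^^ c.toNat) 0
      = [s1, s2, s3, s4].foldl (fun a s => a ^^^ pvSx s) 120 := by
  simp only [String.toList_append, List.append_assoc]
  show ((('$' :: ("PFPBP,".toList ++ _)).drop 1).foldl _ 0) = _
  simp only [List.drop_one, List.tail_cons, List.foldl_append, List.foldl_cons, List.foldl_nil,
    pvSx, pv_foldl_xor_shift, Nat.zero_xor]
  have hp : pvSxL "PFPBP,".toList = 120 := by decide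
  have hc : pvSxL ",".toList = 44 := by decide
  rw [hp, hc]
  simp [Nat.xor_assoc, Nat.xor_comm]

theorem pbp_main (id capacity level quantity : Int) :
    PBP id capacity level quantity = PBP_alt id capacity level quantity := by
  simp only [PBP, PBP_alt, pvChecksumA, List.foldl_cons, List.foldl_nil, List.map_cons,
    List.map_nil, String.join, List.intersperse]
  rw [show ∀ a b c d : String,
      ((((("$PFPBP," ++ a ++ ",") ++ b ++ ",") ++ c ++ ",") ++ d ++ ",")) =
      "$PFPBP," ++ a ++ "," ++ b ++ "," ++ c ++ "," ++ d ++ "," from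
    fun a b c d => by simp [String.append_assoc]]
  rw [pv_cs_eq, String.ext_iff]
  simp [String.toList_append, List.foldl_cons, List.foldl_nil]

-- ===== VERDICT (by name: the statement is the Claim_ definition above) =====
theorem PBP_spec : Claim_equal_PBP := by
  intro id capacity level quantity _
  unfold Spec_PBP
  exact pbp_main id capacity level quantity
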